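-- pv_equiv track=rewrite | github.com/Akheel51/DSA-In-Python | Find Transition Point - GFG/find-transition-point.py | transitionPoint
-- ===== SOURCE A (Python) =====
-- def transitionPoint(arr, n):
--     #Code here
--     if n==1:
--         if arr[0]==0:
--             return -1
--         else:
--             return 0
--     for i in range(n):
--         if arr[i]==1:
--             return i
--     return -1
-- ===== SOURCE B (Python) =====
-- def transitionPoint(arr, n):
--     # Walk the window right-to-left, remembering the latest (i.e. leftmost) 1 seen.
--     ans = -1
--     for i in range(n - 1, -1, -1):
--         if arr[i] == 1:
--             ans = i
--     return ans
-- ===== Notes on version B (the rewrite author's own statement) =====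
-- stated objective: alternative
-- what changed: Replaces A's special-cased n==1 branch plus forward early-exit scan with a single backward (right-to-left) full pass that keeps the leftmost 1 seen in an accumulator; order reversal is proved not to change the result.
-- intended difference: On n == 1 with arr[0] not in {0,1}, A's special-cased first branch returns 0 (treating any nonzero value as a 1) while B returns -1 (no 1 present), matching A's own general-case scan semantics, the intended 'first index of 1'. — e.g. on transitionPoint([7], 1): A returns 0, B returns -1
-- outside the precondition, e.g. on transitionPoint([1], 3): A returns 0, B raises IndexError
import Mathlib
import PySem

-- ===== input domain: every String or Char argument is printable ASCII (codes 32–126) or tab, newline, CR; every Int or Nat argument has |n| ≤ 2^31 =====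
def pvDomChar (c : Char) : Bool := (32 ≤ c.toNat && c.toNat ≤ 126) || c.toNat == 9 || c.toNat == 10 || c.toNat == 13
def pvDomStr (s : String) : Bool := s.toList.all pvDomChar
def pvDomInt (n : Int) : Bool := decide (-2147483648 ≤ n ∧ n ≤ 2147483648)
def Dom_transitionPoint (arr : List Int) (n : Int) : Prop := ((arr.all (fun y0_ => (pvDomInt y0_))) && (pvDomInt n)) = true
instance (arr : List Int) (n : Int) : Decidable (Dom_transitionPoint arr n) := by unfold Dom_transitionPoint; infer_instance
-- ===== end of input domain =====

-- B replaces A's special-cased n==1 branch plus forward early-exit scan with a single backward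
-- full pass keeping the leftmost 1 seen (objective: alternative); B intentionally drops the
-- n==1 fast-path's treatment of any nonzero arr[0] as a 1 (see D_ below).

-- ===== PORT A =====
-- A's `for i in range(n): if arr[i]==1: return i` as recursion on the range counter i.
def pvALoop (arr : List Int) (n : Int) (i : Int) : Int :=
  if _h : i < n then
    if PySem.List.pyGetD arr i 0 == 1 then i else pvALoop arr n (i + 1)
  else -1
termination_by (n - i).toNat
decreasing_by omega

def transitionPoint (arr : List Int) (n : Int) : Int :=
  if n == 1 then
    if PySem.List.pyGetD arr 0 0 == 0 then -1 else 0
  else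
    pvALoop arr n 0

-- ===== PORT B =====
-- Source B's `for i in range(n-1, -1, -1): if arr[i]==1: ans = i` as recursion on the
-- descending counter i carrying the accumulator ans.
def pvBLoop (arr : List Int) (i : Int) (ans : Int) : Int :=
  if _h : 0 ≤ i then
    pvBLoop arr (i - 1) (if PySem.List.pyGetD arr i 0 == 1 then i else ans)
  else ans
termination_by (i + 1).toNat
decreasing_by omega

def transitionPoint_alt (arr : List Int) (n : Int) : Int :=
  pvBLoop arr (n - 1) (-1)

-- ===== PRECONDITION & SPEC =====
-- Pre_ excludes only n > len(arr): there A's scan raises IndexError unless it meets a 1 among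
-- the first len(arr) elements, and B's backward pass starts out of range and raises at once.
def Pre_transitionPoint (arr : List Int) (n : Int) : Prop :=
  n ≤ arr.length
instance (arr : List Int) (n : Int) : Decidable (Pre_transitionPoint arr n) := by
  unfold Pre_transitionPoint; infer_instance

def pvWitness_transitionPoint : List Int × Int := ([0, 0, 1, 1], 4)

-- On n == 1 with arr[0] not in {0,1}, A's special-cased first branch returns 0 (treating any
-- nonzero value as a 1) while B returns -1 (no 1 present), matching A's own general-case scan
-- semantics, the intended 'first index of 1'.
def D_transitionPoint (arr : List Int) (n : Int) : Prop :=
  n = 1 ∧ arr ≠ [] ∧ arr.headI ≠ 0 ∧ arr.headI ≠ 1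
instance (arr : List Int) (n : Int) : Decidable (D_transitionPoint arr n) := by
  unfold D_transitionPoint; infer_instance

def Spec_transitionPoint (arr : List Int) (n : Int) (out : Int) : Prop := ¬ D_transitionPoint arr n → out = transitionPoint_alt arr n
instance (arr : List Int) (n : Int) (out : Int) : Decidable (Spec_transitionPoint arr n out) := by unfold Spec_transitionPoint; infer_instance

def pvDiffWitness_transitionPoint : List Int × Int := ([7], 1)
def pvDiffWitnessOut_transitionPoint : Int × Int := (0, -1)

-- ===== CLAIM (what is proved, stated in full; the proofs are below) =====
def Claim_unchanged_transitionPoint : Prop := ∀ (arr : List Int) (n : Int), Dom_transitionPoint arr n → Pre_transitionPoint arr n → Spec_transitionPoint arr n (transitionPoint arr n)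
def Claim_changed_transitionPoint : Prop := Dom_transitionPoint (pvDiffWitness_transitionPoint.1) (pvDiffWitness_transitionPoint.2) ∧ Pre_transitionPoint (pvDiffWitness_transitionPoint.1) (pvDiffWitness_transitionPoint.2) ∧ D_transitionPoint (pvDiffWitness_transitionPoint.1) (pvDiffWitness_transitionPoint.2) ∧ transitionPoint (pvDiffWitness_transitionPoint.1) (pvDiffWitness_transitionPoint.2) = pvDiffWitnessOut_transitionPoint.1 ∧ transitionPoint_alt (pvDiffWitness_transitionPoint.1) (pvDiffWitness_transitionPoint.2) = pvDiffWitnessOut_transitionPoint.2 ∧ pvDiffWitnessOut_transitionPoint.1 ≠ pvDiffWitnessOut_transitionPoint.2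
def Claim_exact_transitionPoint : Prop := ∀ (arr : List Int) (n : Int), Dom_transitionPoint arr n → Pre_transitionPoint arr n → D_transitionPoint arr n → transitionPoint arr n ≠ transitionPoint_alt arr n

-- ===== LEMMAS AND PROOFS =====

-- Both loops are compared to the first index k (as a Nat) of a 1 in arr.take n.toNat,
-- where k = (take).length means "no 1 in the window".
def pvK (arr : List Int) (n : Int) : Int :=
  ((arr.take n.toNat).findIdx (fun x => x == 1) : Int)

theorem pvK_nonneg (arr : List Int) (n : Int) : 0 ≤ pvK arr n := by
  unfold pvK; positivity

-- strictly before k, the window holds no 1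
theorem pvK_not_one (arr : List Int) (n : Int) (hn : n ≤ arr.length)
    (i : Int) (h0 : 0 ≤ i) (hik : i < pvK arr n) (hin : i < n) :
    PySem.List.pyGetD arr i 0 ≠ 1 := by
  have h2 : (arr.take n.toNat).length = n.toNat := by rw [List.length_take]; omega
  have hlt : i.toNat < (arr.take n.toNat).findIdx (fun x => x == 1) := by
    unfold pvK at hik; omega
  have hv := List.not_of_lt_findIdx hlt
  rw [List.getElem_take] at hv
  rw [PySem.List.pyGetD_eq_getElem arr 0 h0 (by omega)]
  simpa using hv

-- at k (when inside the window) stands a 1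
theorem pvK_one (arr : List Int) (n : Int) (hn : n ≤ arr.length)
    (hk : pvK arr n < n) :
    PySem.List.pyGetD arr (pvK arr n) 0 = 1 := by
  have hk0 := pvK_nonneg arr n
  have h2 : (arr.take n.toNat).length = n.toNat := by rw [List.length_take]; omega
  have hlt : (arr.take n.toNat).findIdx (fun x => x == 1) < (arr.take n.toNat).length := by
    unfold pvK at hk; omega
  have hv := List.findIdx_getElem (w := hlt)
  rw [List.getElem_take] at hv
  have htn : (pvK arr n).toNat = (arr.take n.toNat).findIdx (fun x => x == 1) := by
    unfold pvK; omega
  rw [PySem.List.pyGetD_of_nonneg arr 0 hk0, htn,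
    List.getD_eq_getElem arr 0 (by omega)]
  simpa using hv

-- A's forward scan from i returns k when i ≤ k (−1 if the window holds no 1).
theorem pvALoop_eq (arr : List Int) (n : Int) (hn : n ≤ arr.length) :
    ∀ i : Int, 0 ≤ i → i ≤ pvK arr n →
      pvALoop arr n i = (if pvK arr n < n then pvK arr n else -1) := by
  intro i hi0 hik
  rw [pvALoop]
  by_cases hlt : i < n
  · rw [dif_pos hlt]
    by_cases hik' : i < pvK arr n
    · rw [if_neg (by simpa using pvK_not_one arr n hn i hi0 hik' hlt)]
      exact pvALoop_eq arr n hn (i + 1) (by omega) (by omega)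
    · have hie : i = pvK arr n := by omega
      have hv : PySem.List.pyGetD arr i 0 = 1 := hie ▸ pvK_one arr n hn (by omega)
      rw [if_pos (by simp [hv]), hie, if_pos (by omega)]
  · rw [dif_neg hlt, if_neg (by omega)]
termination_by i => (pvK arr n - i).toNat
decreasing_by omega

-- B's backward pass over i..0 replaces ans exactly when k ≤ i.
theorem pvBLoop_eq (arr : List Int) (n : Int) (hn : n ≤ arr.length) :
    ∀ i : Int, i < n → ∀ ans : Int,
      pvBLoop arr i ans = (if pvK arr n ≤ i then pvK arr n else ans) := by
  intro i hin ans
  have hk0 := pvK_nonneg arr n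
  rw [pvBLoop]
  by_cases h0 : 0 ≤ i
  · rw [dif_pos h0]
    rw [pvBLoop_eq arr n hn (i - 1) (by omega)]
    by_cases hc1 : pvK arr n ≤ i - 1
    · rw [if_pos hc1, if_pos (by omega)]
    · rw [if_neg hc1]
      by_cases hc2 : pvK arr n = i
      · have hv : PySem.List.pyGetD arr i 0 = 1 := hc2 ▸ pvK_one arr n hn (by omega)
        rw [if_pos (by simp [hv]), if_pos (by omega), hc2]
      · have hv := pvK_not_one arr n hn i h0 (by omega) hin
        rw [if_neg (by simpa using hv), if_neg (by omega)]
  · rw [dif_neg h0, if_neg (by omega)]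
termination_by i => (i + 1).toNat
decreasing_by omega

-- B's whole run computes "first 1 in the window, else -1".
theorem pvAlt_eq (arr : List Int) (n : Int) (hn : n ≤ arr.length) :
    transitionPoint_alt arr n = (if pvK arr n < n then pvK arr n else -1) := by
  unfold transitionPoint_alt
  rw [pvBLoop_eq arr n hn (n - 1) (by omega)]
  by_cases h : pvK arr n ≤ n - 1
  · rw [if_pos h, if_pos (by omega)]
  · rw [if_neg h, if_neg (by omega)]

-- ===== VERDICT (by name: the statement is the Claim_ definition above) =====
theorem transitionPoint_spec : Claim_unchanged_transitionPoint := by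
  intro arr n _hdom hpre hnd
  have hn : n ≤ arr.length := hpre
  show transitionPoint arr n = transitionPoint_alt arr n
  unfold transitionPoint
  rw [pvAlt_eq arr n hn]
  by_cases h1 : n = 1
  · subst h1
    rw [if_pos (by decide)]
    obtain ⟨a, t, rfl⟩ : ∃ a t, arr = a :: t := by
      cases arr with
      | nil => simp at hn
      | cons a t => exact ⟨a, t, rfl⟩
    have ha : a = 0 ∨ a = 1 := by
      by_contra hc
      push Not at hc
      exact hnd ⟨rfl, by simp, by simpa using hc.1, by simpa using hc.2⟩
    have hg : PySem.List.pyGetD (a :: t) (0 : Int) 0 = a := by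
      rw [PySem.List.pyGetD_eq_getElem (a :: t) 0 (by omega) (by simp)]
      simp
    have htake : (a :: t).take (1 : Int).toNat = [a] := by rfl
    rcases ha with rfl | rfl
    · rw [if_pos (by simp [hg])]
      have hk : pvK ((0 : Int) :: t) 1 = 1 := by
        unfold pvK; rw [htake]; decide
      rw [hk, if_neg (by omega)]
    · rw [if_neg (by simp [hg])]
      have hk : pvK ((1 : Int) :: t) 1 = 0 := by
        unfold pvK; rw [htake]; decide
      rw [hk, if_pos (by omega)]
  · rw [if_neg (by simpa using h1)]
    exact pvALoop_eq arr n hn 0 (by omega) (pvK_nonneg arr n)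

theorem transitionPoint_changed : Claim_changed_transitionPoint := by
  unfold Claim_changed_transitionPoint
  refine ⟨by decide, by decide, by decide, by decide, ?_, by decide⟩
  show transitionPoint_alt [7] 1 = -1
  rw [pvAlt_eq [7] 1 (by simp)]
  have hk : pvK [7] 1 = 1 := by unfold pvK; decide
  rw [hk]
  decide

theorem transitionPoint_tight : Claim_exact_transitionPoint := by
  intro arr n _hdom hpre hd
  obtain ⟨hn1, hne, h0, h1⟩ := hd
  obtain ⟨a, t, rfl⟩ : ∃ a t, arr = a :: t := by
    cases arr with
    | nil => exact absurd rfl hne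
    | cons a t => exact ⟨a, t, rfl⟩
  simp only [List.headI] at h0 h1
  subst hn1
  have hn : (1 : Int) ≤ (a :: t).length := by simp
  have hg : PySem.List.pyGetD (a :: t) (0 : Int) 0 = a := by
    rw [PySem.List.pyGetD_eq_getElem (a :: t) 0 (by omega) (by simp)]
    simp
  have hA : transitionPoint (a :: t) 1 = 0 := by
    unfold transitionPoint
    rw [if_pos (by decide), if_neg (by simp [hg, h0])]
  have hB : transitionPoint_alt (a :: t) 1 = -1 := by
    rw [pvAlt_eq (a :: t) 1 hn]
    have htake : (a :: t).take (1 : Int).toNat = [a] := by rfl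
    have hk : pvK (a :: t) 1 = 1 := by
      unfold pvK
      rw [htake]
      simp only [List.findIdx, List.findIdx.go, beq_eq_false_iff_ne.mpr h1]
      rfl
    rw [hk, if_neg (by omega)]
  rw [hA, hB]
  decide
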